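/- GENERATED by farm/mkstatement.py from design/units.tsv (unit `vorbis_decode_packet_rest.4c`) and the assertions of Vorbis/Spec/PacketRest4.lean — do not edit.
   THE STATEMENT of the proof unit `vorbis_decode_packet_rest.4c`: segment 4c of `vorbis_decode_packet_rest` (35 instructions; entries 0x110d93;
   exits 0x110cad; ranges 0x110d93-0x110e2c + 0x110c9f-0x110caa)
   takes each of its entry assertions to one of its exit assertions (`Vorbis.Spec.vorbis_decode_packet_rest.Seg4c`), given the contracts of its callees.
   What the names mean: Vorbis/Spec/Basic.lean (the shared hypotheses), Vorbis/Spec/PacketRest4.lean (the assertions). The theorem to prove: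
   `theorem vorbis_decode_packet_rest_4c_ok : Vorbis.Spec.vorbis_decode_packet_rest_4c.Statement`. -/
import Vorbis.Spec.Codebook
import Vorbis.Spec.PacketRest4
namespace Vorbis.Spec.vorbis_decode_packet_rest_4c
open X86 X86.User Asan

/-- The statement of unit `vorbis_decode_packet_rest.4c`. -/
def Statement : Prop :=
  ∀ (Lay : Layout) (_hLay : Lay.hi = 0x1000000) (μ : Microarch) (_hμ : UserX.MicroOK μ) (u₀ : State)
    (_hcode : HasCodeNat Lay u₀ Vorbis.L.vorbis_decode_packet_rest.entry Vorbis.Code.code_vorbis_decode_packet_rest.nat Vorbis.L.vorbis_decode_packet_rest.size)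
    (_h_codebook_decode_scalar_raw : ∀ (others : List Obj) (frames : List (Nat × FrameLayout)) (Blk : Block → Prop) (len : Nat), Calls Lay μ Vorbis.WayInv (Vorbis.conv u₀) Vorbis.L.codebook_decode_scalar_raw.entry (Vorbis.Spec.codebook_decode_scalar_raw.spec others frames Blk len))
    (_h_asan_load1_noabort : Asan.SmallCheck Lay μ Vorbis.WayInv (Vorbis.CodeOK u₀) [.rax, .rdx] 1 Vorbis.L.__asan_load1_noabort.entry)
    (_h_asan_load8_noabort : Asan.SmallCheck Lay μ Vorbis.WayInv (Vorbis.CodeOK u₀) [.rax, .rcx, .rdx] 8 Vorbis.L.__asan_load8_noabort.entry)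
    (_h_asan_load4_noabort : Asan.SmallCheck Lay μ Vorbis.WayInv (Vorbis.CodeOK u₀) [.rax, .rcx, .rdx] 4 Vorbis.L.__asan_load4_noabort.entry)
    (_h_asan_load2_noabort : Asan.SmallCheck Lay μ Vorbis.WayInv (Vorbis.CodeOK u₀) [.rax, .rcx, .rdx] 2 Vorbis.L.__asan_load2_noabort.entry),
    Vorbis.Spec.vorbis_decode_packet_rest.Seg4c Lay μ u₀

end Vorbis.Spec.vorbis_decode_packet_rest_4c
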